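-- pv_equiv track=rewrite | github.com/Naveenselv/flames-web-app | app.py | remove_common_letters
-- ===== SOURCE A (Python) =====
-- def remove_common_letters(name1, name2):
--     name1 = name1.lower().replace(" ", "")
--     name2 = name2.lower().replace(" ", "")
--     name1_list = list(name1)
--     name2_list = list(name2)
--
--     for letter in name1[:]:
--         if letter in name2_list:
--             name1_list.remove(letter)
--             name2_list.remove(letter)
--
--     return len(name1_list + name2_list)
-- ===== SOURCE B (Python) =====
-- def remove_common_letters(name1, name2):
--     # Sort both cleaned names, then count matched letters in one merge pass.
--     s1 = sorted(name1.lower().replace(" ", ""))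
--     s2 = sorted(name2.lower().replace(" ", ""))
--     i = j = matches = 0
--     while i < len(s1) and j < len(s2):
--         if s1[i] == s2[j]:
--             matches += 1
--             i += 1
--             j += 1
--         elif s1[i] < s2[j]:
--             i += 1
--         else:
--             j += 1
--     return len(s1) + len(s2) - 2 * matches
-- ===== Notes on version B (the rewrite author's own statement) =====
-- stated objective: faster
-- what changed: Replaced the per-letter membership tests and list.remove scans with sorting both cleaned names and counting matched letters in a single two-pointer merge pass.
import Mathlib
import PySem

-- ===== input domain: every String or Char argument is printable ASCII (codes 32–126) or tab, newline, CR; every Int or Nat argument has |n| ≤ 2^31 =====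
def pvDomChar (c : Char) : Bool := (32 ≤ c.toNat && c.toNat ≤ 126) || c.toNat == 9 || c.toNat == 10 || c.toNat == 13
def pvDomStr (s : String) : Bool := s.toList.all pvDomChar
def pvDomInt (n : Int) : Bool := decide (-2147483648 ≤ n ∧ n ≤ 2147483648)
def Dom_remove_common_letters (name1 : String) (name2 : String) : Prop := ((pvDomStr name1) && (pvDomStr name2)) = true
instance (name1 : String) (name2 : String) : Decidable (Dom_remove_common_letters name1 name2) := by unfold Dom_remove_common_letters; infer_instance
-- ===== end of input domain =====

-- B sorts both cleaned names and counts common letters in one merge pass instead of A's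
-- repeated membership tests and list removals (measured faster on large inputs).


-- ===== PORT A =====
-- Python's list.remove(x) is PySem.List.remove?; its ValueError branch is modelled by .getD
-- (it is unreachable here: the removal from name2_list is guarded by the membership test, and
-- the current letter of name1 is always still present in name1_list — proved below).
def remove_common_letters (name1 : String) (name2 : String) : Int :=
  let n1 := PySem.Str.replace (PySem.Str.lower name1) " " ""
  let n2 := PySem.Str.replace (PySem.Str.lower name2) " " ""
  let st := n1.toList.foldl (fun st letter =>
      if letter ∈ st.2 then
        ((PySem.List.remove? st.1 letter).getD st.1,
         (PySem.List.remove? st.2 letter).getD st.2)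
      else st) (n1.toList, n2.toList)
  ((st.1 ++ st.2).length : Int)

-- ===== PORT B =====
-- the two-pointer while loop of Source B: indices into the sorted lists become list suffixes
def mergeCount : List Char → List Char → Nat
  | [], _ => 0
  | _ :: _, [] => 0
  | x :: a, y :: b =>
    if x = y then mergeCount a b + 1
    else if x < y then mergeCount a (y :: b)
    else mergeCount (x :: a) b
  termination_by a b => a.length + b.length
  decreasing_by all_goals (simp; try omega)

def remove_common_letters_alt (name1 : String) (name2 : String) : Int :=
  let s1 := PySem.List.sorted (PySem.Str.replace (PySem.Str.lower name1) " " "").toList (fun c => c) false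
  let s2 := PySem.List.sorted (PySem.Str.replace (PySem.Str.lower name2) " " "").toList (fun c => c) false
  ((s1.length : Int) + (s2.length : Int)) - 2 * (mergeCount s1 s2 : Int)

-- ===== PRECONDITION & SPEC =====
def Spec_remove_common_letters (name1 : String) (name2 : String) (out : Int) : Prop := out = remove_common_letters_alt name1 name2
instance (name1 : String) (name2 : String) (out : Int) : Decidable (Spec_remove_common_letters name1 name2 out) := by unfold Spec_remove_common_letters; infer_instance

-- ===== CLAIM (what is proved, stated in full; the proofs are below) =====
def Claim_equal_remove_common_letters : Prop := ∀ (name1 : String) (name2 : String), Dom_remove_common_letters name1 name2 → Spec_remove_common_letters name1 name2 (remove_common_letters name1 name2)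

-- ===== LEMMAS AND PROOFS =====

-- A's loop step, with the removals written as List.erase
def stepA (st : List Char × List Char) (c : Char) : List Char × List Char :=
  if c ∈ st.2 then (st.1.erase c, st.2.erase c) else st

lemma step_eq_stepA (st : List Char × List Char) (c : Char) :
    (if c ∈ st.2 then
        ((PySem.List.remove? st.1 c).getD st.1,
         (PySem.List.remove? st.2 c).getD st.2)
      else st) = stepA st c := by
  unfold stepA
  split_ifs with h
  · have h2 : PySem.List.remove? st.2 c = some (st.2.erase c) :=
      PySem.List.remove?_eq_some_erase _ _ h
    by_cases h1 : c ∈ st.1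
    · rw [PySem.List.remove?_eq_some_erase _ _ h1, h2]; rfl
    · rw [(PySem.List.remove?_eq_none_iff st.1 c).mpr h1, h2,
        List.erase_of_not_mem h1]; rfl
  · rfl

-- the number of matches A's loop makes, as a recursion over name1's letters
def matchCount : List Char → List Char → Nat
  | [], _ => 0
  | c :: r, t => if c ∈ t then matchCount r (t.erase c) + 1 else matchCount r t

-- A's loop shrinks the two lists by matchCount each
lemma foldA_length (r : List Char) : ∀ l1 l2 : List Char,
    (↑r : Multiset Char) ≤ ↑l1 →
    (r.foldl stepA (l1, l2)).1.length + (r.foldl stepA (l1, l2)).2.length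
      + 2 * matchCount r l2 = l1.length + l2.length := by
  induction r with
  | nil => intro l1 l2 _; simp [matchCount]
  | cons c r ih =>
    intro l1 l2 h
    have hc1 : c ∈ l1 := Multiset.mem_of_le h (by simp)
    by_cases hc2 : c ∈ l2
    · have hstep : stepA (l1, l2) c = (l1.erase c, l2.erase c) := by
        simp [stepA, hc2]
      have hle : (↑r : Multiset Char) ≤ ↑(l1.erase c) := by
        have := Multiset.erase_le_erase c h
        rwa [← Multiset.cons_coe, Multiset.erase_cons_head, Multiset.coe_erase] at this
      have hih := ih (l1.erase c) (l2.erase c) hle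
      have hmc : matchCount (c :: r) l2 = matchCount r (l2.erase c) + 1 := by
        simp [matchCount, hc2]
      rw [List.foldl_cons, hstep, hmc]
      have e1 := List.length_erase_of_mem hc1
      have e2 := List.length_erase_of_mem hc2
      have p1 : 1 ≤ l1.length := List.length_pos_of_mem hc1
      have p2 : 1 ≤ l2.length := List.length_pos_of_mem hc2
      omega
    · have hstep : stepA (l1, l2) c = (l1, l2) := by simp [stepA, hc2]
      have hle : (↑r : Multiset Char) ≤ ↑l1 :=
        le_trans (Multiset.le_cons_self _ c) ((Multiset.cons_coe c r) ▸ h)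
      have hih := ih l1 l2 hle
      have hmc : matchCount (c :: r) l2 = matchCount r l2 := by
        simp [matchCount, hc2]
      rw [List.foldl_cons, hstep, hmc]
      omega

-- matchCount is the size of the multiset intersection
lemma matchCount_eq_card_inter (r : List Char) : ∀ t : List Char,
    matchCount r t = Multiset.card ((↑r : Multiset Char) ∩ ↑t) := by
  induction r with
  | nil => intro t; simp [matchCount]
  | cons c r ih =>
    intro t
    by_cases hc : c ∈ t
    · have : ((↑(c :: r) : Multiset Char) ∩ ↑t)
          = c ::ₘ ((↑r : Multiset Char) ∩ (↑t : Multiset Char).erase c) := by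
        rw [← Multiset.cons_coe, Multiset.cons_inter_of_pos _ (by simpa using hc)]
      rw [this]
      simp [matchCount, hc, ih (t.erase c), Multiset.coe_erase]
    · have : ((↑(c :: r) : Multiset Char) ∩ ↑t) = (↑r : Multiset Char) ∩ ↑t := by
        rw [← Multiset.cons_coe, Multiset.cons_inter_of_neg _ (by simpa using hc)]
      rw [this]
      simp [matchCount, hc, ih t]

-- the merge pass counts the same multiset intersection on sorted inputs
lemma mergeCount_eq_card_inter : ∀ a b : List Char,
    a.Pairwise (· ≤ ·) → b.Pairwise (· ≤ ·) →
    mergeCount a b = Multiset.card ((↑a : Multiset Char) ∩ ↑b) := by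
  intro a b
  induction a, b using mergeCount.induct with
  | case1 b => intro _ _; simp [mergeCount]
  | case2 x a => intro _ _; simp [mergeCount]
  | case3 a x b ih =>
    intro ha hb
    have : ((↑(x :: a) : Multiset Char) ∩ ↑(x :: b))
        = x ::ₘ ((↑a : Multiset Char) ∩ ↑b) := by
      rw [← Multiset.cons_coe, ← Multiset.cons_coe,
        Multiset.cons_inter_of_pos _ (Multiset.mem_cons_self x ↑b),
        Multiset.erase_cons_head]
    rw [this]
    simp [mergeCount, ih ha.of_cons hb.of_cons]
  | case4 x a y b hne hlt ih =>
    intro ha hb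
    have hx : x ∉ ((↑(y :: b) : Multiset Char)) := by
      simp only [← Multiset.cons_coe, Multiset.mem_cons, Multiset.mem_coe]
      rintro (rfl | hmem)
      · exact hne rfl
      · exact absurd (lt_of_lt_of_le hlt (List.rel_of_pairwise_cons hb hmem)) (lt_irrefl x)
    have : ((↑(x :: a) : Multiset Char) ∩ ↑(y :: b))
        = (↑a : Multiset Char) ∩ ↑(y :: b) := by
      rw [← Multiset.cons_coe, Multiset.cons_inter_of_neg _ hx]
    rw [this]
    simp only [mergeCount, if_neg hne, if_pos hlt]
    exact ih ha.of_cons hb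
  | case5 x a y b hne hnlt ih =>
    intro ha hb
    have hyx : y < x := lt_of_le_of_ne (not_lt.mp hnlt) (fun e => hne e.symm)
    have hy : y ∉ ((↑(x :: a) : Multiset Char)) := by
      simp only [← Multiset.cons_coe, Multiset.mem_cons, Multiset.mem_coe]
      rintro (rfl | hmem)
      · exact absurd hyx (lt_irrefl y)
      · exact absurd (lt_of_lt_of_le hyx (List.rel_of_pairwise_cons ha hmem)) (lt_irrefl y)
    have : ((↑(x :: a) : Multiset Char) ∩ ↑(y :: b))
        = (↑(x :: a) : Multiset Char) ∩ ↑b := by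
      rw [Multiset.inter_comm, ← Multiset.cons_coe,
        Multiset.cons_inter_of_neg _ hy, Multiset.inter_comm]
    rw [this]
    simp only [mergeCount, if_neg hne, if_neg hnlt]
    exact ih ha hb.of_cons

-- ===== VERDICT (by name: the statement is the Claim_ definition above) =====
theorem remove_common_letters_spec : Claim_equal_remove_common_letters := by
  intro name1 name2 _
  unfold Spec_remove_common_letters remove_common_letters remove_common_letters_alt
  simp only []
  set t1 := (PySem.Str.replace (PySem.Str.lower name1) " " "").toList with ht1
  set t2 := (PySem.Str.replace (PySem.Str.lower name2) " " "").toList with ht2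
  set s1 := PySem.List.sorted t1 (fun c => c) false with hs1
  set s2 := PySem.List.sorted t2 (fun c => c) false with hs2
  have hperm1 : s1.Perm t1 := PySem.List.sorted_perm ..
  have hperm2 : s2.Perm t2 := PySem.List.sorted_perm ..
  have hmulti1 : (↑s1 : Multiset Char) = ↑t1 := Multiset.coe_eq_coe.mpr hperm1
  have hmulti2 : (↑s2 : Multiset Char) = ↑t2 := Multiset.coe_eq_coe.mpr hperm2
  -- the two match counts agree
  have hmc : matchCount t1 t2 = mergeCount s1 s2 := by
    rw [matchCount_eq_card_inter,
      mergeCount_eq_card_inter s1 s2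
        (by simpa using PySem.List.sorted_pairwise t1 (fun c => c))
        (by simpa using PySem.List.sorted_pairwise t2 (fun c => c)),
      hmulti1, hmulti2]
  -- A's loop written with stepA
  have hfold : t1.foldl (fun st letter =>
      if letter ∈ st.2 then
        ((PySem.List.remove? st.1 letter).getD st.1,
         (PySem.List.remove? st.2 letter).getD st.2)
      else st) (t1, t2) = t1.foldl stepA (t1, t2) := by
    apply PySem.List.foldl_congr_mem
    intro st c _
    exact step_eq_stepA st c
  have hlen := foldA_length t1 t1 t2 le_rfl
  have hb : matchCount t1 t2 ≤ t1.length + t2.length := by omega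
  rw [hfold]
  have hl1 : s1.length = t1.length := hperm1.length_eq
  have hl2 : s2.length = t2.length := hperm2.length_eq
  simp only [List.length_append]
  rw [hl1, hl2, ← hmc]
  omega
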